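-- pv_equiv track=rewrite | github.com/bwxu/FactCheckerModels | parse_data.py | get_one_hot_vectors
-- ===== SOURCE A (Python) =====
-- def get_one_hot_vectors(list_of_values, length, mapping):
--     # takes in list of list of values (one list per data point), length of one hot vector
--     # and a frequency mapping
--     top_values = sorted(mapping.items(), key=lambda x: x[1], reverse=True)[:length]
--     one_hot_values = {top_values[i][0]: i for i in range(len(top_values))}
--
--     vectors = []
--     for values in list_of_values:
--         vector = [0]*length
--         for value in values:
--             if value in one_hot_values:
--                 index = one_hot_values[value]
--                 vector[index] = 1
--         vectors.append(vector)
--     return vectors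
-- ===== SOURCE B (Python) =====
-- def get_one_hot_vectors(list_of_values, length, mapping):
--     # Same top-frequency table (kept verbatim for stable tie-breaking), but each
--     # vector is built directly by a comprehension over the table against a per-point
--     # membership set -- no index dict, no in-place assignment.
--     top_values = sorted(mapping.items(), key=lambda x: x[1], reverse=True)[:length]
--     vectors = []
--     for values in list_of_values:
--         point_set = set(values)
--         prefix = [1 if value in point_set else 0 for value, _ in top_values]
--         vectors.append(prefix + [0] * (length - len(top_values)))
--     return vectors
-- ===== Notes on version B (the rewrite author's own statement) =====
-- stated objective: alternative
-- what changed: B drops A's value-to-index dict and in-place vector[index]=1 assignments: it builds each vector directly by a comprehension over the fixed top-value table against a per-point membership set, appending a zero pad.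
-- outside the precondition, e.g. on get_one_hot_vectors([['x']], -1, {'a': 1, 'b': 2}): A returns [[]], B returns [[0]]
import Mathlib
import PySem

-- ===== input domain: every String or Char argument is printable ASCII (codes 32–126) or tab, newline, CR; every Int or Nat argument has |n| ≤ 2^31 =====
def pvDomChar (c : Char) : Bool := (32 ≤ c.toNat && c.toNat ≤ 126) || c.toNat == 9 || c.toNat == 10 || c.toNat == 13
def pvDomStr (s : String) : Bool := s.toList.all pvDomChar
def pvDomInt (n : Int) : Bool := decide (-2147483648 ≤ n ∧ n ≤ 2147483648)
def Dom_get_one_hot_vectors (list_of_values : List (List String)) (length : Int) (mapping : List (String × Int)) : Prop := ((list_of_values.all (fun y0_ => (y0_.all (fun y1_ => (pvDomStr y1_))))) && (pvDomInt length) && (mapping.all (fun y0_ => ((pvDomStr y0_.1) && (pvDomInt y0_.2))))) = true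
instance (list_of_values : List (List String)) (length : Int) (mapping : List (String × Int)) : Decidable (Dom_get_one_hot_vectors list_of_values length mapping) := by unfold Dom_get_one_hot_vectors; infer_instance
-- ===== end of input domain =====

-- B builds each one-hot vector by a comprehension over the top-value table against a per-point
-- membership set, instead of A's value→index dict with in-place assignments (objective: alternative).

-- ===== PORT A =====
def get_one_hot_vectors (list_of_values : List (List String)) (length : Int) (mapping : List (String × Int)) : List (List Int) :=
  let top_values := PySem.List.slice (PySem.List.sorted mapping (fun x => x.2) true) none (some length)
  let one_hot_values : PySem.Dict String Int :=
    (PySem.List.enumerate top_values 0).foldl (fun d p => d.insert p.2.1 p.1) PySem.Dict.empty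
  list_of_values.foldl (fun vectors values =>
    vectors ++ [values.foldl (fun vector value =>
      match one_hot_values.get? value with
      | some index => vector.set index.toNat 1  -- vector[index] = 1; index is in range under Pre_
      | none => vector) (PySem.List.pyRepeat [(0 : Int)] length)]) []

-- ===== PORT B =====
def get_one_hot_vectors_alt (list_of_values : List (List String)) (length : Int) (mapping : List (String × Int)) : List (List Int) :=
  let top_values := PySem.List.slice (PySem.List.sorted mapping (fun x => x.2) true) none (some length)
  list_of_values.foldl (fun vectors values =>
    let point_set : PySem.Set String := PySem.Set.ofList values
    let pre := top_values.map (fun p => if PySem.Set.contains point_set p.1 then (1 : Int) else 0)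
    vectors ++ [pre ++ PySem.List.pyRepeat [(0 : Int)] (length - top_values.length)]) []

-- ===== PRECONDITION & SPEC =====
-- Pre_ restricts to the function's natural domain: it excludes negative lengths at which A's
-- accidental negative slice is still nonempty and some data point exists (there A either raises
-- IndexError or returns vectors shaped by negative list multiplication), and it records that
-- mapping is a Python dict, so its keys are distinct.
def Pre_get_one_hot_vectors (list_of_values : List (List String)) (length : Int) (mapping : List (String × Int)) : Prop :=
  (0 ≤ length ∨ (mapping.length : Int) + length ≤ 0 ∨ list_of_values = []) ∧ (mapping.map Prod.fst).Nodup
instance (list_of_values : List (List String)) (length : Int) (mapping : List (String × Int)) : Decidable (Pre_get_one_hot_vectors list_of_values length mapping) := by unfold Pre_get_one_hot_vectors; infer_instance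
def pvWitness_get_one_hot_vectors : List (List String) × Int × (List (String × Int)) :=
  ([["a"], ["b", "c"]], 2, [("a", 1), ("b", 2), ("c", 1)])

def Spec_get_one_hot_vectors (list_of_values : List (List String)) (length : Int) (mapping : List (String × Int)) (out : List (List Int)) : Prop := out = get_one_hot_vectors_alt list_of_values length mapping
instance (list_of_values : List (List String)) (length : Int) (mapping : List (String × Int)) (out : List (List Int)) : Decidable (Spec_get_one_hot_vectors list_of_values length mapping out) := by unfold Spec_get_one_hot_vectors; infer_instance

-- ===== CLAIM (what is proved, stated in full; the proofs are below) =====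
def Claim_equal_get_one_hot_vectors : Prop := ∀ (list_of_values : List (List String)) (length : Int) (mapping : List (String × Int)), Dom_get_one_hot_vectors list_of_values length mapping → Pre_get_one_hot_vectors list_of_values length mapping → Spec_get_one_hot_vectors list_of_values length mapping (get_one_hot_vectors list_of_values length mapping)

-- ===== LEMMAS AND PROOFS =====

-- the dict {top[i][0]: i} built by A, characterised by a last-match find? over the insertions
theorem pv_get?_foldl_insert (l : List (Int × (String × Int))) (d : PySem.Dict String Int) (v : String) :
    (l.foldl (fun d p => d.insert p.2.1 p.1) d).get? v =
      match l.reverse.find? (fun p => p.2.1 == v) with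
      | some p => some p.1
      | none => d.get? v := by
  induction l generalizing d with
  | nil => simp
  | cons p t ih =>
    simp only [List.foldl_cons, ih, List.reverse_cons, List.find?_append]
    cases h : t.reverse.find? (fun p => p.2.1 == v) with
    | some q => simp
    | none =>
      by_cases hv : p.2.1 = v
      · subst hv; simp [List.find?, PySem.Dict.get?_insert_self]
      · have hb : (p.2.1 == v) = false := by simp [hv]
        simp [List.find?, hb, PySem.Dict.get?_insert_of_ne d p.1 (Ne.symm hv)]

-- with distinct keys in top, A's dict maps v to j iff j indexes an occurrence of v in top
theorem pv_oneHot_get (top : List (String × Int)) (hnd : (top.map Prod.fst).Nodup)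
    (v : String) (j : Int) :
    ((PySem.List.enumerate top 0).foldl (fun d p => d.insert p.2.1 p.1) PySem.Dict.empty).get? v = some j ↔
      ∃ (k : Nat) (h : k < top.length), top[k].1 = v ∧ j = (k : Int) := by
  rw [pv_get?_foldl_insert]
  constructor
  · intro h
    cases hf : (PySem.List.enumerate top 0).reverse.find? (fun p => p.2.1 == v) with
    | none => rw [hf] at h; simp [PySem.Dict.get?_empty] at h
    | some q =>
      rw [hf] at h
      have hq : q ∈ PySem.List.enumerate top 0 := List.mem_reverse.mp (List.mem_of_find?_eq_some hf)
      have hpred := List.find?_some hf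
      obtain ⟨k, hk, rfl⟩ := (PySem.List.mem_enumerate_iff _ _ _).mp hq
      refine ⟨k, hk, ?_, ?_⟩
      · simpa using hpred
      · simp at h; omega
  · rintro ⟨k, hk, hv, rfl⟩
    have hmem : ((0 : Int) + (k : Int), top[k]) ∈ (PySem.List.enumerate top 0).reverse := by
      rw [List.mem_reverse]
      exact (PySem.List.mem_enumerate_iff _ _ _).mpr ⟨k, hk, rfl⟩
    have hsome : ((PySem.List.enumerate top 0).reverse.find? (fun p => p.2.1 == v)).isSome := by
      rw [List.find?_isSome]
      exact ⟨_, hmem, by simp [hv]⟩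
    cases hf : (PySem.List.enumerate top 0).reverse.find? (fun p => p.2.1 == v) with
    | none => rw [hf] at hsome; simp at hsome
    | some q =>
      have hq : q ∈ PySem.List.enumerate top 0 := List.mem_reverse.mp (List.mem_of_find?_eq_some hf)
      have hpred := List.find?_some hf
      obtain ⟨k', hk', rfl⟩ := (PySem.List.mem_enumerate_iff _ _ _).mp hq
      have hv' : top[k'].1 = v := by simpa using hpred
      have : k' = k := by
        have h1 : (top.map Prod.fst)[k']'(by simpa using hk') = (top.map Prod.fst)[k]'(by simpa using hk) := by
          simp [hv', hv]
        exact (List.Nodup.getElem_inj_iff hnd).mp h1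
      subst this
      simp

-- A's dict stores only nonnegative indices
theorem pv_oneHot_nonneg (top : List (String × Int)) (hnd : (top.map Prod.fst).Nodup)
    (v : String) (i : Int)
    (h : ((PySem.List.enumerate top 0).foldl (fun d p => d.insert p.2.1 p.1) PySem.Dict.empty).get? v = some i) :
    0 ≤ i := by
  obtain ⟨k, _, _, rfl⟩ := (pv_oneHot_get top hnd v i).mp h
  exact Int.natCast_nonneg k

-- A's inner loop preserves the vector length
theorem pv_foldA_length (oh : PySem.Dict String Int) (values : List String) :
    ∀ init : List Int,
      (values.foldl (fun vec v => match oh.get? v with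
        | some i => vec.set i.toNat 1
        | none => vec) init).length = init.length := by
  induction values with
  | nil => intro init; simp
  | cons v t ih =>
    intro init
    simp only [List.foldl_cons]
    rw [ih]
    cases oh.get? v <;> simp

-- the value of A's inner loop at any in-range position
theorem pv_foldA_getElem? (oh : PySem.Dict String Int)
    (hnn : ∀ v i, oh.get? v = some i → 0 ≤ i) (values : List String) :
    ∀ (init : List Int) (j : Nat) (hj : j < init.length),
      (values.foldl (fun vec v => match oh.get? v with
        | some i => vec.set i.toNat 1
        | none => vec) init)[j]? =
        some (if ∃ v ∈ values, oh.get? v = some (j : Int) then 1 else init[j]) := by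
  induction values with
  | nil => intro init j hj; simp [List.getElem?_eq_getElem hj]
  | cons v t ih =>
    intro init j hj
    simp only [List.foldl_cons]
    cases hv : oh.get? v with
    | none =>
      rw [ih init j hj]
      congr 1
      by_cases ht : ∃ w ∈ t, oh.get? w = some (j : Int) <;> simp [ht, hv]
    | some i =>
      have hi : 0 ≤ i := hnn v i hv
      have hlen : j < (init.set i.toNat 1).length := by simpa using hj
      rw [ih (init.set i.toNat 1) j hlen]
      congr 1
      have hset : (init.set i.toNat 1)[j]'hlen = if i.toNat = j then 1 else init[j] := by
        rw [List.getElem_set]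
      rw [hset]
      by_cases ht : ∃ w ∈ t, oh.get? w = some (j : Int)
      · simp [ht]
      · by_cases hij : i = (j : Int)
        · simp [ht, hv, hij]
        · have hne : ¬ i.toNat = j := by omega
          simp [ht, hv, hij, hne]

-- per data point, A's loop over values equals B's comprehension over the top table
theorem pv_point_eq (top : List (String × Int)) (hnd : (top.map Prod.fst).Nodup)
    (L : Nat) (htop : top.length ≤ L) (values : List String) :
    (values.foldl (fun vec v =>
        match ((PySem.List.enumerate top 0).foldl (fun d p => d.insert p.2.1 p.1) PySem.Dict.empty).get? v with
        | some i => vec.set i.toNat 1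
        | none => vec) (List.replicate L (0 : Int))) =
      top.map (fun p => if PySem.Set.contains (PySem.Set.ofList values) p.1 then (1 : Int) else 0)
        ++ List.replicate (L - top.length) (0 : Int) := by
  set oh := (PySem.List.enumerate top 0).foldl (fun d p => d.insert p.2.1 p.1) PySem.Dict.empty with hoh
  have hnn : ∀ v i, oh.get? v = some i → 0 ≤ i := fun v i h => pv_oneHot_nonneg top hnd v i h
  apply List.ext_getElem?
  intro j
  have hlenL : (values.foldl (fun vec v => match oh.get? v with
      | some i => vec.set i.toNat 1 | none => vec) (List.replicate L (0 : Int))).length = L := by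
    rw [pv_foldA_length]; simp
  have hlenR : (top.map (fun p => if PySem.Set.contains (PySem.Set.ofList values) p.1 then (1 : Int) else 0)
      ++ List.replicate (L - top.length) (0 : Int)).length = L := by
    simp; omega
  by_cases hj : j < L
  · rw [pv_foldA_getElem? oh hnn values (List.replicate L (0 : Int)) j (by simpa using hj)]
    have hcond : (∃ v ∈ values, oh.get? v = some (j : Int)) ↔ (j < top.length ∧ top[j]!.1 ∈ values) := by
      constructor
      · rintro ⟨v, hvmem, hv⟩
        obtain ⟨k, hk, hkv, hjk⟩ := (pv_oneHot_get top hnd v _).mp hv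
        obtain rfl : k = j := by omega
        exact ⟨hk, by rw [getElem!_pos top k hk, hkv]; exact hvmem⟩
      · rintro ⟨hjt, hmem⟩
        refine ⟨top[j]!.1, by rwa [getElem!_pos top j hjt] at hmem ⊢, ?_⟩
        exact (pv_oneHot_get top hnd _ _).mpr ⟨j, hjt, by rw [getElem!_pos top j hjt], rfl⟩
    rw [List.getElem?_eq_getElem (by rw [hlenR]; exact hj)]
    by_cases hjt : j < top.length
    · rw [List.getElem_append_left (by simpa using hjt)]
      have hg : (top.map (fun p => if PySem.Set.contains (PySem.Set.ofList values) p.1 then (1 : Int) else 0))[j]'(by simpa using hjt)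
          = if PySem.Set.contains (PySem.Set.ofList values) top[j].1 then (1 : Int) else 0 := by
        simp
      rw [hg]
      have hmemiff : PySem.Set.contains (PySem.Set.ofList values) top[j].1 = true ↔ top[j].1 ∈ values := by
        rw [PySem.Set.contains_iff, PySem.Set.mem_ofList]
      by_cases hm : top[j].1 ∈ values
      · have hc : ∃ v ∈ values, oh.get? v = some (j : Int) :=
          hcond.mpr ⟨hjt, by rwa [getElem!_pos top j hjt]⟩
        simp [hc, hm]
      · have hc : ¬ ∃ v ∈ values, oh.get? v = some (j : Int) := by
          intro h
          exact hm (by have h2 := (hcond.mp h).2; rwa [getElem!_pos top j hjt] at h2)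
        simp [hc, hm]
    · rw [List.getElem_append_right (by simpa using hjt)]
      have : (∃ v ∈ values, oh.get? v = some (j : Int)) = False := by
        simp only [eq_iff_iff, iff_false]
        intro hc
        exact hjt (hcond.mp hc).1
      simp [this]
  · rw [List.getElem?_eq_none (by omega), List.getElem?_eq_none (by omega)]

-- top's keys are distinct because mapping's are (sorted is a permutation, the slice a sublist)
theorem pv_top_nodup (mapping : List (String × Int)) (length : Int) (h0 : 0 ≤ length)
    (hnd : (mapping.map Prod.fst).Nodup) :
    ((PySem.List.slice (PySem.List.sorted mapping (fun x => x.2) true) none (some length)).map Prod.fst).Nodup := by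
  rw [PySem.List.slice_to _ h0]
  have hperm : (PySem.List.sorted mapping (fun x => x.2) true).Perm mapping := PySem.List.sorted_perm _ _ _
  have hnd' : ((PySem.List.sorted mapping (fun x => x.2) true).map Prod.fst).Nodup :=
    ((hperm.map Prod.fst).nodup_iff).mpr hnd
  exact hnd'.sublist ((List.take_sublist _ _).map Prod.fst)

theorem pv_top_len (mapping : List (String × Int)) (length : Int) (h0 : 0 ≤ length) :
    (PySem.List.slice (PySem.List.sorted mapping (fun x => x.2) true) none (some length)).length ≤ length.toNat := by
  rw [PySem.List.slice_to _ h0]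
  simp

-- ===== VERDICT (by name: the statement is the Claim_ definition above) =====
theorem get_one_hot_vectors_spec : Claim_equal_get_one_hot_vectors := by
  intro list_of_values length mapping _ hpre
  obtain ⟨hdisj, hnd⟩ := hpre
  unfold Spec_get_one_hot_vectors get_one_hot_vectors get_one_hot_vectors_alt
  simp only []
  set top := PySem.List.slice (PySem.List.sorted mapping (fun x => x.2) true) none (some length) with htop
  rw [PySem.List.foldl_append_singleton_eq_map, PySem.List.foldl_append_singleton_eq_map]
  simp only [List.nil_append]
  apply List.map_congr_left
  intro values hvmem
  by_cases h0 : 0 ≤ length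
  · have hnd' := pv_top_nodup mapping length h0 hnd
    have hlen := pv_top_len mapping length h0
    have hrep : PySem.List.pyRepeat [(0 : Int)] length = List.replicate length.toNat (0 : Int) :=
      PySem.List.pyRepeat_singleton _ _
    have hrep2 : PySem.List.pyRepeat [(0 : Int)] (length - top.length) = List.replicate (length.toNat - top.length) (0 : Int) := by
      rw [PySem.List.pyRepeat_singleton]
      congr 1
      omega
    rw [hrep, hrep2]
    exact pv_point_eq top hnd' length.toNat hlen values
  · -- negative length: the slice is empty (Pre_ guarantees mapping.length + length ≤ 0),
    -- so both sides build the empty vector for every data point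
    have hle : (mapping.length : Int) + length ≤ 0 := by
      rcases hdisj with h | h | h
      · omega
      · exact h
      · rw [h] at hvmem; simp at hvmem
    have hk : 0 < (-length).toNat := by omega
    have hlk : length = -(((-length).toNat : Nat) : Int) := by omega
    have htop0 : top = [] := by
      rw [htop, hlk, PySem.List.slice_to_neg_natCast _ _ hk, PySem.List.length_sorted]
      have hz : mapping.length - (-length).toNat = 0 := by omega
      rw [hz, List.take_zero]
    have hrep : PySem.List.pyRepeat [(0 : Int)] length = [] := by
      rw [PySem.List.pyRepeat_singleton]
      have : length.toNat = 0 := by omega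
      simp [this]
    rw [htop0]
    simp only [PySem.List.enumerate_nil, List.foldl_nil, List.map_nil, List.length_nil,
      List.nil_append, Int.natCast_zero, sub_zero, hrep]
    have hfold : ∀ init : List Int, values.foldl (fun vec v =>
        match (PySem.Dict.empty : PySem.Dict String Int).get? v with
        | some i => vec.set i.toNat 1
        | none => vec) init = init := by
      intro init
      induction values generalizing init with
      | nil => simp
      | cons v t ih => simpa [PySem.Dict.get?_empty] using ih _
    exact hfold []
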